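-- pv_equiv track=rewrite | github.com/topatlant/AdventOfCode-python | y2017/day03.py | part2
-- ===== SOURCE A (Python) =====
-- def part2(threshold: int) -> int:
--     grid = {(0, 0): 1}
--     value = 1
--     spiral_walk = spiral_iterator()
--
--     while value <= threshold:
--         coords = next(spiral_walk)
--         value = sum(grid[(x, y)] for x, y in neighbors(coords) if (x, y) in grid)
--         grid[coords] = value
--     return value
--
-- def spiral_iterator():
--     x, y = 0, 0
--     k = 1
--     while True:
--         for i in range(k):  # right
--             x += 1
--             yield x, y
--         for i in range(k):  # up
--             y += 1
--             yield x, y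
--         k += 1
--         for i in range(k):  # left
--             x -= 1
--             yield x, y
--         for i in range(k):  # down
--             y -= 1
--             yield x, y
--         k += 1
--
-- def neighbors(coord):
--     for i in (-1, 0, 1):
--         for j in (-1, 0, 1):
--             yield coord[0] + i, coord[1] + j
-- ===== SOURCE B (Python) =====
-- def part2(threshold: int) -> int:
--     grid = {(0, 0): 1}
--     x, y = 0, 0
--     dx, dy = 1, 0
--     value = 1
--     while value <= threshold:
--         x, y = x + dx, y + dy
--         value = sum(grid.get((x + i, y + j), 0)
--                     for i in (-1, 0, 1) for j in (-1, 0, 1))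
--         grid[(x, y)] = value
--         if x == y or (x < 0 and x == -y) or (x > 0 and x == 1 - y):
--             dx, dy = -dy, dx
--     return value
-- ===== Notes on version B (the rewrite author's own statement) =====
-- stated objective: alternative
-- what changed: Replaces the run-length spiral generator (nested for-loops over segment counts k) with a single-step walk that keeps a position and direction and turns left at spiral corners recognised by a closed-form arithmetic condition on (x, y), and replaces the membership-filtered neighbour sum with dict.get defaults.
import Mathlib
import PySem

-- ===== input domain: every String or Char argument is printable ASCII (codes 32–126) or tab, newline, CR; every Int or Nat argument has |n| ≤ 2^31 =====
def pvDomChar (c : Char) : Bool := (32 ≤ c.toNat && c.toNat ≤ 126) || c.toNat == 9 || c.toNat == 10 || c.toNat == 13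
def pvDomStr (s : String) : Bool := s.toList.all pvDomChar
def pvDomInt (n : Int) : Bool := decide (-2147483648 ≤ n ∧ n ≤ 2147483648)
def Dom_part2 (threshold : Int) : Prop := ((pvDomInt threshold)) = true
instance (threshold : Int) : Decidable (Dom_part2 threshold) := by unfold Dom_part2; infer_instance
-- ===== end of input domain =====

-- B replaces A's run-length spiral generator by a position+direction walk that turns
-- left at corners given by an arithmetic condition (objective: alternative, same cost).

-- ===== PORT A =====
-- A's generator spiral_iterator, ported as a state machine over
-- (x, y, k, phase, r): phase 0/1/2/3 = right/up/left/down segment,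
-- r = yields remaining in the current segment (the generator's for-loops).
def spiralStep (st : Int × Int × Int × Int × Int) :
    (Int × Int) × (Int × Int × Int × Int × Int) :=
  match st with
  | (x, y, k, phase, r) =>
    if phase = 0 then      -- right: x += 1; yield
      ((x + 1, y), if r = 1 then (x + 1, y, k, 1, k) else (x + 1, y, k, 0, r - 1))
    else if phase = 1 then -- up: y += 1; yield; then k += 1
      ((x, y + 1), if r = 1 then (x, y + 1, k + 1, 2, k + 1) else (x, y + 1, k, 1, r - 1))
    else if phase = 2 then -- left: x -= 1; yield
      ((x - 1, y), if r = 1 then (x - 1, y, k, 3, k) else (x - 1, y, k, 2, r - 1))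
    else                   -- down: y -= 1; yield; then k += 1
      ((x, y - 1), if r = 1 then (x, y - 1, k + 1, 0, k + 1) else (x, y - 1, k, 3, r - 1))

-- neighbors(coord): (coord[0]+i, coord[1]+j) for i in (-1,0,1), j in (-1,0,1)
def neighListA (c : Int × Int) : List (Int × Int) :=
  ([-1, 0, 1] : List Int).flatMap (fun i => ([-1, 0, 1] : List Int).map (fun j => (c.1 + i, c.2 + j)))

-- sum(grid[(x, y)] for x, y in neighbors(coords) if (x, y) in grid)
def neighSumA (grid : PySem.Dict (Int × Int) Int) (c : Int × Int) : Int :=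
  (neighListA c).foldl (fun acc p => if grid.contains p then acc + grid.getD p 0 else acc) 0

def part2Loop : Nat → PySem.Dict (Int × Int) Int → Int → (Int × Int × Int × Int × Int) → Int → Int
  | 0, _, value, _, _ => value
  | fuel + 1, grid, value, st, threshold =>
    if value ≤ threshold then
      let cs := spiralStep st
      let v := neighSumA grid cs.1
      part2Loop fuel (grid.insert cs.1 v) v cs.2 threshold
    else value

def part2 (threshold : Int) : Int :=
  part2Loop 100000 (PySem.Dict.ofList [((0, 0), 1)]) 1 (0, 0, 1, 0, 1) threshold

-- ===== PORT B =====
def corner (x y : Int) : Bool :=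
  (x == y) || (x < 0 && x == -y) || (x > 0 && x == 1 - y)

-- sum(grid.get((x+i, y+j), 0) for i in (-1,0,1) for j in (-1,0,1))
def neighSumB (grid : PySem.Dict (Int × Int) Int) (x y : Int) : Int :=
  (([-1, 0, 1] : List Int).flatMap (fun i => ([-1, 0, 1] : List Int).map (fun j => (x + i, y + j)))).foldl
    (fun acc p => acc + grid.getD p 0) 0

def part2AltLoop : Nat → PySem.Dict (Int × Int) Int → Int → Int → Int → Int → Int → Int → Int
  | 0, _, value, _, _, _, _, _ => value
  | fuel + 1, grid, value, x, y, dx, dy, threshold =>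
    if value ≤ threshold then
      let x' := x + dx
      let y' := y + dy
      let v := neighSumB grid x' y'
      let grid' := grid.insert (x', y') v
      if corner x' y' then part2AltLoop fuel grid' v x' y' (-dy) dx threshold
      else part2AltLoop fuel grid' v x' y' dx dy threshold
    else value

def part2_alt (threshold : Int) : Int :=
  part2AltLoop 100000 (PySem.Dict.ofList [((0, 0), 1)]) 1 0 0 1 0 threshold

-- ===== PRECONDITION & SPEC =====
def Spec_part2 (threshold : Int) (out : Int) : Prop := out = part2_alt threshold
instance (threshold : Int) (out : Int) : Decidable (Spec_part2 threshold out) := by unfold Spec_part2; infer_instance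

-- ===== CLAIM (what is proved, stated in full; the proofs are below) =====
def Claim_equal_part2 : Prop := ∀ (threshold : Int), Dom_part2 threshold → Spec_part2 threshold (part2 threshold)

-- ===== LEMMAS AND PROOFS =====

-- invariant: the generator state corresponds to B's position and direction
def InvA (st : Int × Int × Int × Int × Int) (dx dy : Int) : Prop :=
  match st with
  | (x, y, k, phase, r) =>
    ∃ n : Int, 0 ≤ n ∧
      ((phase = 0 ∧ dx = 1 ∧ dy = 0 ∧ k = 2*n+1 ∧ y = -n ∧ 1 ≤ r ∧ r ≤ 2*n+1 ∧ x = n+1-r) ∨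
       (phase = 1 ∧ dx = 0 ∧ dy = 1 ∧ k = 2*n+1 ∧ x = n+1 ∧ 1 ≤ r ∧ r ≤ 2*n+1 ∧ y = n+1-r) ∨
       (phase = 2 ∧ dx = -1 ∧ dy = 0 ∧ k = 2*n+2 ∧ y = n+1 ∧ 1 ≤ r ∧ r ≤ 2*n+2 ∧ x = -(n+1)+r) ∨
       (phase = 3 ∧ dx = 0 ∧ dy = -1 ∧ k = 2*n+2 ∧ x = -(n+1) ∧ 1 ≤ r ∧ r ≤ 2*n+2 ∧ y = -(n+1)+r))

lemma spiralStep_pos (st : Int × Int × Int × Int × Int) :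
    (spiralStep st).2.1 = (spiralStep st).1.1 ∧ (spiralStep st).2.2.1 = (spiralStep st).1.2 := by
  obtain ⟨x, y, k, phase, r⟩ := st
  simp only [spiralStep]
  split_ifs <;> simp

lemma step_agree (x y k phase r dx dy : Int) (h : InvA (x, y, k, phase, r) dx dy) :
    (spiralStep (x, y, k, phase, r)).1 = (x + dx, y + dy) ∧
      InvA (spiralStep (x, y, k, phase, r)).2
        (if corner (x + dx) (y + dy) then -dy else dx)
        (if corner (x + dx) (y + dy) then dx else dy) := by
  obtain ⟨n, hn, hc⟩ := h
  rcases hc with ⟨h0, hdx, hdy, hk, hy, hr1, hr2, hx⟩ |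
    ⟨h0, hdx, hdy, hk, hx, hr1, hr2, hy⟩ |
    ⟨h0, hdx, hdy, hk, hy, hr1, hr2, hx⟩ |
    ⟨h0, hdx, hdy, hk, hx, hr1, hr2, hy⟩ <;>
    subst h0 hdx hdy <;> by_cases hr : r = 1
  · -- right, last step of the segment: turn at (n+1, -n)
    have hcor : corner (x + 1) (y + 0) = true := by simp [corner]; omega
    subst hr
    refine ⟨by simp [spiralStep], ?_⟩
    rw [hcor, show (spiralStep (x, y, k, (0:Int), 1)).2 = (x + 1, y, k, 1, k) by
      simp [spiralStep]]
    exact ⟨n, hn, Or.inr (Or.inl (by simp; omega))⟩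
  · have hcor : corner (x + 1) (y + 0) = false := by simp [corner]; omega
    refine ⟨by simp [spiralStep], ?_⟩
    rw [hcor, show (spiralStep (x, y, k, (0:Int), r)).2 = (x + 1, y, k, 0, r - 1) by
      simp [spiralStep, hr]]
    exact ⟨n, hn, Or.inl (by simp; omega)⟩
  · -- up, last step: turn at (n+1, n+1)
    have hcor : corner (x + 0) (y + 1) = true := by simp [corner]; omega
    subst hr
    refine ⟨by simp [spiralStep], ?_⟩
    rw [hcor, show (spiralStep (x, y, k, (1:Int), 1)).2 = (x, y + 1, k + 1, 2, k + 1) by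
      simp [spiralStep]]
    exact ⟨n, hn, Or.inr (Or.inr (Or.inl (by simp; omega)))⟩
  · have hcor : corner (x + 0) (y + 1) = false := by simp [corner]; omega
    refine ⟨by simp [spiralStep], ?_⟩
    rw [hcor, show (spiralStep (x, y, k, (1:Int), r)).2 = (x, y + 1, k, 1, r - 1) by
      simp [spiralStep, hr]]
    exact ⟨n, hn, Or.inr (Or.inl (by simp; omega))⟩
  · -- left, last step: turn at (-(n+1), n+1)
    have hcor : corner (x + -1) (y + 0) = true := by simp [corner]; omega
    subst hr
    refine ⟨by simp [spiralStep, sub_eq_add_neg], ?_⟩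
    rw [hcor, show (spiralStep (x, y, k, (2:Int), 1)).2 = (x - 1, y, k, 3, k) by
      simp [spiralStep]]
    exact ⟨n, hn, Or.inr (Or.inr (Or.inr (by simp; omega)))⟩
  · have hcor : corner (x + -1) (y + 0) = false := by simp [corner]; omega
    refine ⟨by simp [spiralStep, sub_eq_add_neg], ?_⟩
    rw [hcor, show (spiralStep (x, y, k, (2:Int), r)).2 = (x - 1, y, k, 2, r - 1) by
      simp [spiralStep, hr]]
    exact ⟨n, hn, Or.inr (Or.inr (Or.inl (by simp; omega)))⟩
  · -- down, last step: turn at (-(n+1), -(n+1)); next ring n+1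
    have hcor : corner (x + 0) (y + -1) = true := by simp [corner]; omega
    subst hr
    refine ⟨by simp [spiralStep, sub_eq_add_neg], ?_⟩
    rw [hcor, show (spiralStep (x, y, k, (3:Int), 1)).2 = (x, y - 1, k + 1, 0, k + 1) by
      simp [spiralStep]]
    exact ⟨n + 1, by omega, Or.inl (by simp; omega)⟩
  · have hcor : corner (x + 0) (y + -1) = false := by simp [corner]; omega
    refine ⟨by simp [spiralStep, sub_eq_add_neg], ?_⟩
    rw [hcor, show (spiralStep (x, y, k, (3:Int), r)).2 = (x, y - 1, k, 3, r - 1) by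
      simp [spiralStep, hr]]
    exact ⟨n, hn, Or.inr (Or.inr (Or.inr (by simp; omega)))⟩

lemma foldl_filter_getD (g : PySem.Dict (Int × Int) Int) :
    ∀ (l : List (Int × Int)) (acc : Int),
      l.foldl (fun a p => if g.contains p then a + g.getD p 0 else a) acc =
        l.foldl (fun a p => a + g.getD p 0) acc := by
  intro l
  induction l with
  | nil => intro acc; rfl
  | cons p t ih =>
    intro acc
    simp only [List.foldl_cons]
    by_cases hp : g.contains p
    · rw [if_pos hp]; exact ih _
    · have h0 : g.getD p 0 = 0 := PySem.Dict.getD_of_not_contains g 0 (by simpa using hp)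
      rw [if_neg hp, h0, add_zero]
      exact ih acc

lemma neighSum_agree (g : PySem.Dict (Int × Int) Int) (x y : Int) :
    neighSumA g (x, y) = neighSumB g x y := by
  unfold neighSumA neighSumB neighListA
  exact foldl_filter_getD g _ 0

lemma loop_agree : ∀ (fuel : Nat) (grid : PySem.Dict (Int × Int) Int)
    (value threshold : Int) (st : Int × Int × Int × Int × Int) (dx dy : Int),
    InvA st dx dy →
    part2Loop fuel grid value st threshold =
      part2AltLoop fuel grid value st.1 st.2.1 dx dy threshold := by
  intro fuel
  induction fuel with
  | zero => intro grid value threshold st dx dy _; rfl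
  | succ m ih =>
    intro grid value threshold st dx dy h
    obtain ⟨x, y, k, phase, r⟩ := st
    obtain ⟨hco, hinv⟩ := step_agree x y k phase r dx dy h
    simp only [part2Loop, part2AltLoop]
    by_cases hv : value ≤ threshold
    · rw [if_pos hv, if_pos hv]
      have hpos := spiralStep_pos (x, y, k, phase, r)
      by_cases hcor : corner (x + dx) (y + dy)
      · rw [if_pos hcor]
        rw [if_pos hcor, if_pos hcor] at hinv
        have := ih (grid.insert (spiralStep (x, y, k, phase, r)).1
            (neighSumA grid (spiralStep (x, y, k, phase, r)).1))
            (neighSumA grid (spiralStep (x, y, k, phase, r)).1) threshold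
            (spiralStep (x, y, k, phase, r)).2 (-dy) dx hinv
        rw [this, hpos.1, hpos.2, hco, neighSum_agree]
      · rw [if_neg hcor]
        rw [if_neg hcor, if_neg hcor] at hinv
        have := ih (grid.insert (spiralStep (x, y, k, phase, r)).1
            (neighSumA grid (spiralStep (x, y, k, phase, r)).1))
            (neighSumA grid (spiralStep (x, y, k, phase, r)).1) threshold
            (spiralStep (x, y, k, phase, r)).2 dx dy hinv
        rw [this, hpos.1, hpos.2, hco, neighSum_agree]
    · rw [if_neg hv, if_neg hv]

-- ===== VERDICT (by name: the statement is the Claim_ definition above) =====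
theorem part2_spec : Claim_equal_part2 := by
  intro threshold _
  unfold Spec_part2 part2 part2_alt
  exact loop_agree 100000 _ 1 threshold (0, 0, 1, 0, 1) 1 0 ⟨0, by norm_num [InvA]⟩
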